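-- pv_equiv track=rewrite | github.com/racoon2code/AOC25 | day06/part2/solution.py | parse_worksheet_part2
-- ===== SOURCE A (Python) =====
-- import operator
--
-- OPS = {
--     "+": operator.add,
--     "-": operator.sub,
--     "*": operator.mul,
--     "/": operator.truediv,
-- }
--
-- def parse_worksheet_part2(input_string: str) -> list[tuple[list[int], str]]:
--
--     lines = [line.rstrip("\n") for line in input_string.splitlines() if line.strip()]
--     if not lines:
--         return []
--
--
--     width = max(len(line) for line in lines)
--     grid = [list(line.ljust(width)) for line in lines]
--
--     height = len(grid)
--     last_row = height - 1
--
--     problems: list[tuple[list[int], str]] = []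
--
--     col = 0
--     while col < width:
--
--         if all(grid[row][col] == " " for row in range(height)):
--             col += 1
--             continue
--
--         start = col
--         while col < width and not all(grid[row][col] == " " for row in range(height)):
--             col += 1
--         end = col
--
--         op_symbol = None
--         for c in range(start, end):
--             ch = grid[last_row][c]
--             if ch in OPS:
--                 op_symbol = ch
--                 break
--
--         if op_symbol is None:
--             raise ValueError(f"Kein Operator in Spalten {start}..{end-1} gefunden")
--
--         ceph_nums: list[int] = []
--         for c in range(end - 1, start - 1, -1):
--             digits: list[str] = []
--             for r in range(last_row):
--                 ch = grid[r][c]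
--                 if ch.isdigit():
--                     digits.append(ch)
--             if digits:
--                 ceph_nums.append(int("".join(digits)))
--
--         problems.append((ceph_nums, op_symbol))
--
--     return problems
-- ===== SOURCE B (Python) =====
-- def _finish(block, start):
--     nums, op, end = block
--     if op is None:
--         raise ValueError(f"Kein Operator in Spalten {start}..{end} gefunden")
--     return (nums, op)
--
--
-- def parse_worksheet_part2(input_string: str) -> list[tuple[list[int], str]]:
--     lines = [line for line in input_string.splitlines() if line.strip()]
--     if not lines:
--         return []
--     width = max(len(line) for line in lines)
--     body = lines[:-1]
--     last = lines[-1].ljust(width)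
--     # one streaming pass over the columns RIGHT-TO-LEFT, building the result back-to-front:
--     # numbers of a problem arrive already in A's (right-to-left) order, the operator is the
--     # last one seen (= leftmost), and each finished problem is consed onto the front.
--     problems = []
--     block = None  # (nums, op_or_None, end_index) of the problem currently being crossed
--     for c in range(width - 1, -1, -1):
--         col_chars = [row[c] for row in body if c < len(row)]
--         if last[c] == " " and all(ch == " " for ch in col_chars):
--             if block is not None:
--                 problems = [_finish(block, c + 1)] + problems
--                 block = None
--             continue
--         if block is None:
--             block = ([], None, c)
--         nums, op, end = block
--         if last[c] in "+-*/":
--             op = last[c]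
--         digits = [ch for ch in col_chars if ch.isdigit()]
--         if digits:
--             nums = nums + [int("".join(digits))]
--         block = (nums, op, end)
--     if block is not None:
--         problems = [_finish(block, 0)] + problems
--     return problems
-- ===== Notes on version B (the rewrite author's own statement) =====
-- stated objective: alternative
-- what changed: B makes one streaming pass over the columns right-to-left with a (numbers, operator, end) accumulator, consing each finished problem onto the front of the result, instead of A's left-to-right block segmentation with two sliding all-space scans, a separate operator scan per block and a second per-block descending column loop.
import Mathlib
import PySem

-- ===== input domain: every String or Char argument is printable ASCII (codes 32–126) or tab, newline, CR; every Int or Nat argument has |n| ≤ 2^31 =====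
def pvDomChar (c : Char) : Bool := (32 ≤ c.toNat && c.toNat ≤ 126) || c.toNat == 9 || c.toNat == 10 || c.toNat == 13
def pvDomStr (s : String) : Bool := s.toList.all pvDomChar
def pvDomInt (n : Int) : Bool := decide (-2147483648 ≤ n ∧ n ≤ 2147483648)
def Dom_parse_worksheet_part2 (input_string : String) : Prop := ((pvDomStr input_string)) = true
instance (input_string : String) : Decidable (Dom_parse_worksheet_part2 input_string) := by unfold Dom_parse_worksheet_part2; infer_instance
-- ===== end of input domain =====

-- B replaces A's left-to-right block segmentation (with its separate operator scan and
-- per-block descending column loop) by ONE streaming pass over the columns right-to-left,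
-- building the result back-to-front (objective: alternative decomposition).

-- ===== PORT A =====
-- line.rstrip("\n")
def pvRstripNL (cs : List Char) : List Char := ((cs.reverse).dropWhile (fun c => c == '\n')).reverse

-- all(grid[row][col] == " " for row in range(height))
def pvAColBlank (grid : List (List Char)) (height c : Nat) : Bool :=
  (List.range height).all (fun r => (grid.getD r []).getD c ' ' == ' ')

-- the inner "while col < width and not all(...)" scan (fuel-guarded; fuel = width - c suffices)
def pvAFindEnd (grid : List (List Char)) (height width : Nat) : Nat → Nat → Nat
  | 0, c => c
  | f + 1, c =>
    if c < width then
      if pvAColBlank grid height c then c else pvAFindEnd grid height width f (c + 1)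
    else c

-- the "for c in range(start, end)" operator scan over grid[last_row] (fuel = e - c suffices)
def pvAOp (lastRow : List Char) : Nat → Nat → Nat → Option Char
  | 0, _, _ => none
  | f + 1, c, e =>
    if c < e then
      let ch := lastRow.getD c ' '
      if ch == '+' || ch == '-' || ch == '*' || ch == '/' then some ch
      else pvAOp lastRow f (c + 1) e
    else none

-- digits collected over rows 0..last_row-1 of column c
def pvADigits (grid : List (List Char)) (lastRow c : Nat) : List Char :=
  (List.range lastRow).foldl (fun acc r =>
    if PySem.Chars.isdigit ((grid.getD r []).getD c ' ') then acc ++ [(grid.getD r []).getD c ' '] else acc) []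

-- "for c in range(end - 1, start - 1, -1)": k counts the remaining columns, current column is s + k - 1
def pvANums (grid : List (List Char)) (lastRow s : Nat) : Nat → List Int
  | 0 => []
  | k + 1 =>
    let digits := pvADigits grid lastRow (s + k)
    (if digits ≠ [] then [(PySem.Int.ofChars? digits).getD 0] else []) ++ pvANums grid lastRow s k

-- the outer "while col < width" loop (fuel-guarded; col grows each iteration, so fuel = width suffices)
def pvALoop (grid : List (List Char)) (height width lastRow : Nat) : Nat → Nat → List (List Int × String)
  | 0, _ => []
  | f + 1, col =>
    if col < width then
      if pvAColBlank grid height col then pvALoop grid height width lastRow f (col + 1)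
      else
        let e := pvAFindEnd grid height width (width - col) col
        match pvAOp (grid.getD lastRow []) (e - col) col e with
        | none => []   -- Python raises ValueError here; such inputs are excluded by Pre_
        | some op => (pvANums grid lastRow col (e - col), String.ofList [op]) :: pvALoop grid height width lastRow f e
    else []

def parse_worksheet_part2 (input_string : String) : List (List Int × String) :=
  let lines := ((PySem.Chars.splitlines input_string.toList).filter
                  (fun l => !(PySem.Chars.strip l).isEmpty)).map pvRstripNL
  if lines.isEmpty then [] else
  let width := (lines.map List.length).foldl max 0
  let grid := lines.map (fun l => l ++ List.replicate (width - l.length) ' ')  -- line.ljust(width)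
  let height := grid.length
  let lastRow := height - 1
  pvALoop grid height width lastRow width 0

-- ===== PORT B =====
-- _finish(block, start): the flushed problem as a 0/1-element list
-- (on op = None the Python raises ValueError; such inputs are excluded by Pre_)
def pvBFlushOut (b : List Int × Option Char × Nat) : List (List Int × String) :=
  match b.2.1 with
  | none => []
  | some o => [(b.1, String.ofList [o])]

def pvBFlushOpt : Option (List Int × Option Char × Nat) → List (List Int × String)
  | none => []
  | some b => pvBFlushOut b

-- "for c in range(width-1, -1, -1)" with the (problems, current-block) state;
-- n = number of columns still to process, the current column is n-1; n = 0 is the final flush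
def pvBGo (body : List (List Char)) (last : List Char) :
    Nat → List (List Int × String) × Option (List Int × Option Char × Nat) → List (List Int × String)
  | 0, (probs, blk) => pvBFlushOpt blk ++ probs
  | c + 1, (probs, blk) =>
    let colChars := body.filterMap (fun row => if c < row.length then some (row.getD c ' ') else none)
    if (last.getD c ' ' == ' ') && colChars.all (fun ch => ch == ' ') then
      match blk with
      | none => pvBGo body last c (probs, none)
      | some b => pvBGo body last c (pvBFlushOut b ++ probs, none)
    else
      let b0 := blk.getD ([], none, c)
      let ch := last.getD c ' '
      let op' := if ch == '+' || ch == '-' || ch == '*' || ch == '/' then some ch else b0.2.1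
      let digits := colChars.filter PySem.Chars.isdigit
      let nums' := if digits ≠ [] then b0.1 ++ [(PySem.Int.ofChars? digits).getD 0] else b0.1
      pvBGo body last c (probs, some (nums', op', b0.2.2))

def parse_worksheet_part2_alt (input_string : String) : List (List Int × String) :=
  let lines := (PySem.Chars.splitlines input_string.toList).filter
                  (fun l => !(PySem.Chars.strip l).isEmpty)
  if lines.isEmpty then [] else
  let width := (lines.map List.length).foldl max 0
  let body := lines.dropLast                              -- lines[:-1]
  let last := (PySem.List.pyGet? lines (-1)).getD []      -- lines[-1]
  let lastP := last ++ List.replicate (width - last.length) ' '   -- .ljust(width)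
  pvBGo body lastP width ([], none)

-- ===== PRECONDITION & SPEC =====
def pvPreLines (s : String) : List (List Char) :=
  (PySem.Chars.splitlines s.toList).filter (fun l => !(PySem.Chars.strip l).isEmpty)

def pvPreBlankCol (lines : List (List Char)) (c : Nat) : Bool :=
  lines.all (fun l => l.getD c ' ' == ' ')

def pvPreOpChar (ch : Char) : Bool := ch == '+' || ch == '-' || ch == '*' || ch == '/'

-- the run of non-blank columns starting at st (if st starts one) has an operator column d
def pvPreRunOK (lines : List (List Char)) (width st : Nat) : Bool :=
  pvPreBlankCol lines st
  || !(st == 0 || pvPreBlankCol lines (st - 1))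
  || (List.range width).any (fun d =>
       decide (st ≤ d)
       && (List.range (d + 1)).all (fun k => !(decide (st ≤ k)) || !(pvPreBlankCol lines k))
       && pvPreOpChar ((lines.getD (lines.length - 1) []).getD d ' '))

-- Pre_ excludes exactly the inputs on which A raises ValueError: a maximal run of
-- non-blank columns whose last row contains no operator character (B raises there too).
def Pre_parse_worksheet_part2 (input_string : String) : Prop :=
  ((List.range (((pvPreLines input_string).map List.length).foldl max 0)).all
    (fun st => pvPreRunOK (pvPreLines input_string)
      (((pvPreLines input_string).map List.length).foldl max 0) st)) = true

instance (input_string : String) : Decidable (Pre_parse_worksheet_part2 input_string) := by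
  unfold Pre_parse_worksheet_part2; infer_instance

def pvWitness_parse_worksheet_part2 : String := "1\n+"

def Spec_parse_worksheet_part2 (input_string : String) (out : List (List Int × String)) : Prop :=
  out = parse_worksheet_part2_alt input_string

instance (input_string : String) (out : List (List Int × String)) : Decidable (Spec_parse_worksheet_part2 input_string out) := by
  unfold Spec_parse_worksheet_part2; infer_instance

-- ===== CLAIM (what is proved, stated in full; the proofs are below) =====
def Claim_equal_parse_worksheet_part2 : Prop := ∀ (input_string : String), Dom_parse_worksheet_part2 input_string → Pre_parse_worksheet_part2 input_string → Spec_parse_worksheet_part2 input_string (parse_worksheet_part2 input_string)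


-- ===== LEMMAS AND PROOFS =====

-- proof-side Prop form of column blankness
def pvBlankP (lines : List (List Char)) (c : Nat) : Prop :=
  ∀ r < lines.length, (lines.getD r []).getD c ' ' = ' '

theorem pvPreBlankCol_iff (lines : List (List Char)) (c : Nat) :
    pvPreBlankCol lines c = true ↔ pvBlankP lines c := by
  unfold pvPreBlankCol pvBlankP
  simp only [List.all_eq_true, beq_iff_eq]
  constructor
  · intro h r hr
    rw [List.getD_eq_getElem _ _ hr]
    exact h _ (List.getElem_mem hr)
  · intro h l hl
    obtain ⟨r, hr, rfl⟩ := List.mem_iff_getElem.mp hl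
    have := h r hr
    rwa [List.getD_eq_getElem _ _ hr] at this

theorem pvPreRunOK_spec (lines : List (List Char)) (w st : Nat)
    (h : pvPreRunOK lines w st = true)
    (h1 : ¬ pvBlankP lines st) (h2 : st = 0 ∨ pvBlankP lines (st - 1)) :
    ∃ d, d < w ∧ st ≤ d ∧ (∀ k, k ≤ d → st ≤ k → ¬ pvBlankP lines k) ∧
      ((lines.getD (lines.length - 1) []).getD d ' ' = '+' ∨
       (lines.getD (lines.length - 1) []).getD d ' ' = '-' ∨
       (lines.getD (lines.length - 1) []).getD d ' ' = '*' ∨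
       (lines.getD (lines.length - 1) []).getD d ' ' = '/') := by
  unfold pvPreRunOK at h
  rw [Bool.or_eq_true, Bool.or_eq_true] at h
  rcases h with (h | h) | h
  · exact absurd ((pvPreBlankCol_iff lines st).mp h) h1
  · exfalso
    simp only [Bool.not_eq_true', Bool.or_eq_false_iff] at h
    obtain ⟨ha, hb'⟩ := h
    rcases h2 with rfl | hb2
    · simp at ha
    · rw [← pvPreBlankCol_iff] at hb2
      rw [hb2] at hb'
      simp at hb'
  · rw [List.any_eq_true] at h
    obtain ⟨d, hdm, hconj⟩ := h
    rw [Bool.and_eq_true, Bool.and_eq_true] at hconj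
    obtain ⟨⟨hst, hall⟩, hop⟩ := hconj
    refine ⟨d, by simpa using hdm, by simpa using hst, ?_, ?_⟩
    · intro k hk1 hk2 hbk
      have hk := List.all_eq_true.mp hall k (List.mem_range.mpr (by omega))
      rw [Bool.or_eq_true] at hk
      rcases hk with hk | hk
      · simp at hk; omega
      · simp only [Bool.not_eq_true'] at hk
        rw [← pvPreBlankCol_iff] at hbk
        rw [hbk] at hk
        simp at hk
    · have := hop
      unfold pvPreOpChar at this
      simp only [Bool.or_eq_true, beq_iff_eq] at this
      tauto

-- splitlines produces no line-break characters inside its lines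
theorem pvGoNoBreak (isB : Char → Bool) (s cur : List Char) (acc : List (List Char))
    (hcur : ∀ c ∈ cur, isB c = false)
    (hacc : ∀ l ∈ acc, ∀ c ∈ l, isB c = false) :
    ∀ l ∈ PySem.Chars.splitlines.go isB s cur acc, ∀ c ∈ l, isB c = false := by
  fun_induction PySem.Chars.splitlines.go isB s cur acc
  case case1 cur acc _ =>
    intro l hl
    exact hacc l (by simpa using hl)
  case case2 cur acc _ =>
    intro l hl
    rcases List.mem_cons.mp (List.mem_reverse.mp hl) with h | h
    · subst h; intro c hc; exact hcur c (by simpa using hc)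
    · exact hacc l h
  case case3 rest cur acc ih =>
    refine ih (by simp) ?_
    intro l hl
    rcases List.mem_cons.mp hl with h | h
    · subst h; intro c hc; exact hcur c (by simpa using hc)
    · exact hacc l h
  case case4 c rest cur acc _ _ ih =>
    refine ih (by simp) ?_
    intro l hl
    rcases List.mem_cons.mp hl with h | h
    · subst h; intro c' hc'; exact hcur c' (by simpa using hc')
    · exact hacc l h
  case case5 c rest cur acc _ hb ih =>
    refine ih ?_ hacc
    intro c' hc'
    rcases List.mem_cons.mp hc' with h | h
    · subst h; simpa using hb
    · exact hcur c' h

theorem pvSplitlinesNoNL (cs : List Char) :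
    ∀ l ∈ PySem.Chars.splitlines cs, '\n' ∉ l := by
  intro l hl hmem
  have := pvGoNoBreak _ cs [] [] (by simp) (by simp) l (by simpa [PySem.Chars.splitlines] using hl) '\n' hmem
  simp at this

theorem pvRstripNL_id (l : List Char) (h : '\n' ∉ l) : pvRstripNL l = l := by
  unfold pvRstripNL
  rw [List.dropWhile_eq_self_iff.mpr, List.reverse_reverse]
  intro hlen
  have hm : l.reverse[0] ∈ l := List.mem_reverse.mp (List.getElem_mem hlen)
  simp only [beq_iff_eq]
  rintro heq; rw [heq] at hm; exact h hm

-- generic getD facts used to move between the row grid and B's body/last views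
theorem pvCellPad (l : List Char) (w c : Nat) :
    (l ++ List.replicate (w - l.length) ' ').getD c ' ' = l.getD c ' ' := by
  rcases lt_or_ge c l.length with h | h
  · rw [List.getD_eq_getElem?_getD, List.getElem?_append_left h, ← List.getD_eq_getElem?_getD]
  · rw [List.getD_eq_getElem?_getD, List.getElem?_append_right h,
        List.getD_eq_getElem?_getD, List.getElem?_eq_none (by omega : l.length ≤ c)]
    simp only [List.getElem?_replicate]
    split <;> rfl

theorem pvGetDMap {α β : Type} (f : α → β) (l : List α) (r : Nat) (hr : r < l.length)
    (d : α) (d' : β) : (l.map f).getD r d' = f (l.getD r d) := by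
  simp [List.getD_eq_getElem?_getD, List.getElem?_eq_getElem hr]

theorem pvGridCell (lines : List (List Char)) (w r c : Nat) :
    (((lines.map (fun l => l ++ List.replicate (w - l.length) ' ')).getD r []).getD c ' ')
      = (lines.getD r []).getD c ' ' := by
  rcases lt_or_ge r lines.length with h | h
  · rw [pvGetDMap _ _ _ (by simpa using h) []]
    exact pvCellPad _ w c
  · have h1 : (lines.map (fun l => l ++ List.replicate (w - l.length) ' '))[r]? = none := by
      rw [List.getElem?_eq_none_iff]; simpa using h
    have h2 : lines[r]? = none := List.getElem?_eq_none h
    simp [List.getD_eq_getElem?_getD, h1, h2]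

theorem pvAColBlank_iff (lines : List (List Char)) (w c : Nat) :
    pvAColBlank (lines.map (fun l => l ++ List.replicate (w - l.length) ' ')) lines.length c = true
      ↔ pvBlankP lines c := by
  unfold pvAColBlank pvBlankP
  simp only [List.all_eq_true, List.mem_range, beq_iff_eq]
  exact forall_congr' fun r => imp_congr_right fun _ => by rw [pvGridCell]

-- B's padded last line IS row lastRow of A's grid
theorem pvLastP_eq (lines : List (List Char)) (w : Nat) (hne : lines ≠ []) :
    ((PySem.List.pyGet? lines (-1)).getD []) ++
        List.replicate (w - ((PySem.List.pyGet? lines (-1)).getD []).length) ' '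
      = (lines.map (fun l => l ++ List.replicate (w - l.length) ' ')).getD (lines.length - 1) [] := by
  have hlen : lines.length - 1 < lines.length := by
    cases lines with
    | nil => simp at hne
    | cons a l => simp
  rw [PySem.List.pyGet?_neg_one, List.getLast?_eq_getElem?, List.getElem?_eq_getElem hlen]
  rw [pvGetDMap _ _ _ hlen []]
  rw [List.getD_eq_getElem _ _ hlen]
  simp

-- body rows are the corresponding rows of lines
theorem pvBodyGetD (lines : List (List Char)) (r : Nat) (hr : r < lines.length - 1) :
    lines.dropLast.getD r [] = lines.getD r [] := by
  have h1 : r < lines.dropLast.length := by simpa using hr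
  have h2 : r < lines.length := by omega
  rw [List.getD_eq_getElem _ _ h1, List.getD_eq_getElem _ _ h2, List.getElem_dropLast]

-- B's all-space test over the filterMapped column  ↔  all body rows blank at c
theorem pvBAllSpace (rows : List (List Char)) (c : Nat) :
    ((rows.filterMap (fun row => if c < row.length then some (row.getD c ' ') else none)).all
        (fun ch => ch == ' ') = true)
      ↔ ∀ row ∈ rows, row.getD c ' ' = ' ' := by
  induction rows with
  | nil => simp
  | cons row rest ih =>
    by_cases h : c < row.length
    · simp only [List.filterMap_cons, if_pos h, List.all_cons, Bool.and_eq_true, beq_iff_eq, ih,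
        List.mem_cons, forall_eq_or_imp]
    · have hd : row.getD c ' ' = ' ' := List.getD_eq_default _ _ (by omega)
      simp only [List.filterMap_cons, if_neg h, ih, List.mem_cons, forall_eq_or_imp, hd, true_and]

-- B's blank test at column c  ↔  A's column blankness
theorem pvBBlank_iff (lines : List (List Char)) (w c : Nat) (hne : lines ≠ []) :
    (((((lines.map (fun l => l ++ List.replicate (w - l.length) ' ')).getD (lines.length - 1) []).getD c ' ' == ' ') &&
        (lines.dropLast.filterMap (fun row => if c < row.length then some (row.getD c ' ') else none)).all
          (fun ch => ch == ' ')) = true)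
      ↔ pvBlankP lines c := by
  rw [Bool.and_eq_true, pvBAllSpace, beq_iff_eq, pvGridCell]
  unfold pvBlankP
  constructor
  · rintro ⟨hl, hb⟩ r hr
    rcases Nat.lt_or_ge r (lines.length - 1) with h | h
    · have hm : lines.dropLast.getD r [] ∈ lines.dropLast := by
        rw [List.getD_eq_getElem _ _ (by simpa using h)]
        exact List.getElem_mem _
      have := hb _ hm
      rwa [pvBodyGetD lines r h] at this
    · have : r = lines.length - 1 := by omega
      subst this; exact hl
  · intro hh
    refine ⟨hh _ (by cases lines with | nil => simp at hne | cons a l => simp), ?_⟩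
    intro row hrow
    obtain ⟨r, hr, rfl⟩ := List.mem_iff_getElem.mp hrow
    have hr' : r < lines.length - 1 := by simpa using hr
    have := hh r (by omega)
    rw [← pvBodyGetD lines r hr'] at this
    rwa [List.getD_eq_getElem _ _ hr] at this

-- (range l.length).map (fun r => f (l.getD r d)) = l.map f
theorem pvRangeGetDMap {α β : Type} (l : List α) (d : α) (f : α → β) :
    (List.range l.length).map (fun r => f (l.getD r d)) = l.map f := by
  apply List.ext_getElem
  · simp
  · intro i h1 h2
    simp only [List.getElem_map, List.getElem_range]
    rw [List.getD_eq_getElem _ _ (by simpa using h2)]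

-- filtering digits ignores the rows the comprehension's guard drops (they contribute ' ')
theorem pvBDigitsFilter (rows : List (List Char)) (c : Nat) :
    (rows.map (fun row => row.getD c ' ')).filter PySem.Chars.isdigit
      = (rows.filterMap (fun row => if c < row.length then some (row.getD c ' ') else none)).filter
          PySem.Chars.isdigit := by
  induction rows with
  | nil => simp
  | cons row rest ih =>
    by_cases h : c < row.length
    · simp only [List.map_cons, List.filterMap_cons, h, if_pos, List.filter_cons, ih]
    · have hd : row.getD c ' ' = ' ' := List.getD_eq_default _ _ (by omega)
      simp only [List.map_cons, List.filterMap_cons, if_neg h, List.filter_cons, hd]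
      have : PySem.Chars.isdigit ' ' = false := by decide
      rw [this]
      simpa using ih

-- A's per-column digit loop equals B's filtered comprehension column
theorem pvDigits_eq (lines : List (List Char)) (w c : Nat) :
    pvADigits (lines.map (fun l => l ++ List.replicate (w - l.length) ' ')) (lines.length - 1) c
      = (lines.dropLast.filterMap (fun row => if c < row.length then some (row.getD c ' ') else none)).filter
          PySem.Chars.isdigit := by
  unfold pvADigits
  rw [PySem.List.foldl_append_if (fun r => PySem.Chars.isdigit
        (((lines.map (fun l => l ++ List.replicate (w - l.length) ' ')).getD r []).getD c ' '))
      (fun r => ((lines.map (fun l => l ++ List.replicate (w - l.length) ' ')).getD r []).getD c ' ')]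
  simp only [pvGridCell, List.nil_append]
  have hfm : (((List.range (lines.length - 1)).map
        (fun r => (lines.getD r []).getD c ' ')).filter PySem.Chars.isdigit)
      = ((List.range (lines.length - 1)).filter
          (fun r => PySem.Chars.isdigit ((lines.getD r []).getD c ' '))).map
          (fun r => (lines.getD r []).getD c ' ') := by
    simp [List.filter_map, Function.comp_def]
  rw [← hfm]
  have hbody : (List.range (lines.length - 1)).map (fun r => (lines.getD r []).getD c ' ')
      = lines.dropLast.map (fun row => row.getD c ' ') := by
    have hlen : lines.dropLast.length = lines.length - 1 := by simp
    rw [← hlen]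
    rw [← pvRangeGetDMap lines.dropLast [] (fun row => row.getD c ' ')]
    apply List.map_congr_left
    intro r hr
    rw [pvBodyGetD lines r (by rw [← hlen]; simpa using hr)]
  rw [hbody, pvBDigitsFilter]

-- peel pvANums from the bottom column
theorem pvANums_peel (grid : List (List Char)) (lastRow s k : Nat) :
    pvANums grid lastRow s (k + 1)
      = pvANums grid lastRow (s + 1) k
        ++ (if pvADigits grid lastRow s ≠ [] then [(PySem.Int.ofChars? (pvADigits grid lastRow s)).getD 0] else []) := by
  induction k generalizing s with
  | zero => simp [pvANums]
  | succ k ih =>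
    have htop : s + (k + 1) = (s + 1) + k := by omega
    conv_lhs => rw [pvANums]
    rw [ih]
    conv_rhs => rw [pvANums]
    rw [htop, List.append_assoc]

-- the probs accumulator only ever receives conses: it factors out of pvBGo
theorem pvBGo_probs (body : List (List Char)) (last : List Char) (n : Nat)
    (blk : Option (List Int × Option Char × Nat)) (probs : List (List Int × String)) :
    pvBGo body last n (probs, blk) = pvBGo body last n ([], blk) ++ probs := by
  induction n generalizing blk probs with
  | zero => simp [pvBGo]
  | succ c ih =>
    simp only [pvBGo]
    split
    · cases blk with
      | none => exact ih none probs
      | some b =>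
        dsimp only
        rw [ih none (pvBFlushOut b ++ probs), ih none (pvBFlushOut b ++ [])]
        simp
    · exact ih _ probs

-- closing a block at a boundary column (c = 0 or column c-1 blank)
theorem pvBClose (lines : List (List Char)) (w : Nat) (hne : lines ≠ []) (c : Nat)
    (hb : c = 0 ∨ pvBlankP lines (c - 1)) (b : List Int × Option Char × Nat)
    (probs : List (List Int × String)) :
    pvBGo lines.dropLast
        (((PySem.List.pyGet? lines (-1)).getD []) ++
          List.replicate (w - ((PySem.List.pyGet? lines (-1)).getD []).length) ' ')
        c (probs, some b)
      = pvBGo lines.dropLast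
          (((PySem.List.pyGet? lines (-1)).getD []) ++
            List.replicate (w - ((PySem.List.pyGet? lines (-1)).getD []).length) ' ')
          c (pvBFlushOut b ++ probs, none) := by
  rcases hb with rfl | hb
  · simp [pvBGo, pvBFlushOpt]
  · cases c with
    | zero => simp [pvBGo, pvBFlushOpt]
    | succ c =>
      have hbl : (((((PySem.List.pyGet? lines (-1)).getD []) ++
            List.replicate (w - ((PySem.List.pyGet? lines (-1)).getD []).length) ' ').getD c ' ' == ' ') &&
          (lines.dropLast.filterMap (fun row => if c < row.length then some (row.getD c ' ') else none)).all
            (fun ch => ch == ' ')) = true := by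
        rw [pvLastP_eq lines w hne]
        exact (pvBBlank_iff lines w c hne).mpr (by simpa using hb)
      simp only [pvBGo]
      rw [if_pos hbl, if_pos hbl]

-- crossing one maximal run of non-blank columns [c, e) accumulates exactly A's block data
theorem pvBAccum (lines : List (List Char)) (w : Nat) (hne : lines ≠ []) (e c : Nat)
    (hce : c < e)
    (hnb : ∀ j, c ≤ j → j < e → ¬ pvBlankP lines j)
    (probs : List (List Int × String)) :
    pvBGo lines.dropLast
        (((PySem.List.pyGet? lines (-1)).getD []) ++
          List.replicate (w - ((PySem.List.pyGet? lines (-1)).getD []).length) ' ')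
        e (probs, none)
      = pvBGo lines.dropLast
          (((PySem.List.pyGet? lines (-1)).getD []) ++
            List.replicate (w - ((PySem.List.pyGet? lines (-1)).getD []).length) ' ')
          c (probs,
             some (pvANums (lines.map (fun l => l ++ List.replicate (w - l.length) ' ')) (lines.length - 1) c (e - c),
                   pvAOp ((lines.map (fun l => l ++ List.replicate (w - l.length) ' ')).getD (lines.length - 1) []) (e - c) c e,
                   e - 1)) := by
  have hblc : ¬ (((((lines.map (fun l => l ++ List.replicate (w - l.length) ' ')).getD (lines.length - 1) []).getD c ' ' == ' ') &&
      (lines.dropLast.filterMap (fun row => if c < row.length then some (row.getD c ' ') else none)).all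
        (fun ch => ch == ' ')) = true) := by
    intro hx
    exact hnb c (le_refl c) hce ((pvBBlank_iff lines w c hne).mp hx)
  by_cases h1 : c + 1 = e
  · subst h1
    rw [pvLastP_eq lines w hne]
    simp only [pvBGo]
    rw [if_neg hblc]
    simp only [Option.getD_none]
    have hnums : (if ((lines.dropLast.filterMap (fun row => if c < row.length then some (row.getD c ' ') else none)).filter
            PySem.Chars.isdigit) ≠ [] then
          ([] : List Int) ++ [(PySem.Int.ofChars? ((lines.dropLast.filterMap (fun row => if c < row.length then some (row.getD c ' ') else none)).filter
            PySem.Chars.isdigit)).getD 0] else [])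
        = pvANums (lines.map (fun l => l ++ List.replicate (w - l.length) ' ')) (lines.length - 1) c (c + 1 - c) := by
      rw [show c + 1 - c = 1 by omega]
      simp only [pvANums, Nat.add_zero, pvDigits_eq lines w c, List.nil_append, List.append_nil]
    have hop : (if (((lines.map (fun l => l ++ List.replicate (w - l.length) ' ')).getD (lines.length - 1) []).getD c ' ' == '+' ||
            ((lines.map (fun l => l ++ List.replicate (w - l.length) ' ')).getD (lines.length - 1) []).getD c ' ' == '-' ||
            ((lines.map (fun l => l ++ List.replicate (w - l.length) ' ')).getD (lines.length - 1) []).getD c ' ' == '*' ||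
            ((lines.map (fun l => l ++ List.replicate (w - l.length) ' ')).getD (lines.length - 1) []).getD c ' ' == '/') then
          some (((lines.map (fun l => l ++ List.replicate (w - l.length) ' ')).getD (lines.length - 1) []).getD c ' ')
        else none)
        = pvAOp ((lines.map (fun l => l ++ List.replicate (w - l.length) ' ')).getD (lines.length - 1) []) (c + 1 - c) c (c + 1) := by
      rw [show c + 1 - c = 1 by omega]
      simp only [pvAOp]
      rw [if_pos (by omega : c < c + 1)]
    rw [hnums, hop, show c + 1 - 1 = c by omega]
  · have hce' : c + 1 < e := by omega
    rw [pvBAccum lines w hne e (c + 1) hce' (fun j hj1 hj2 => hnb j (by omega) hj2) probs]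
    rw [pvLastP_eq lines w hne]
    simp only [pvBGo]
    rw [if_neg hblc]
    simp only [Option.getD_some]
    have hnums : (if ((lines.dropLast.filterMap (fun row => if c < row.length then some (row.getD c ' ') else none)).filter
            PySem.Chars.isdigit) ≠ [] then
          pvANums (lines.map (fun l => l ++ List.replicate (w - l.length) ' ')) (lines.length - 1) (c + 1) (e - (c + 1))
            ++ [(PySem.Int.ofChars? ((lines.dropLast.filterMap (fun row => if c < row.length then some (row.getD c ' ') else none)).filter
            PySem.Chars.isdigit)).getD 0]
        else pvANums (lines.map (fun l => l ++ List.replicate (w - l.length) ' ')) (lines.length - 1) (c + 1) (e - (c + 1)))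
        = pvANums (lines.map (fun l => l ++ List.replicate (w - l.length) ' ')) (lines.length - 1) c (e - c) := by
      rw [show e - c = (e - c - 1) + 1 by omega, pvANums_peel, pvDigits_eq lines w c,
          show e - (c + 1) = e - c - 1 by omega]
      split
      · rfl
      · simp
    have hop : (if (((lines.map (fun l => l ++ List.replicate (w - l.length) ' ')).getD (lines.length - 1) []).getD c ' ' == '+' ||
            ((lines.map (fun l => l ++ List.replicate (w - l.length) ' ')).getD (lines.length - 1) []).getD c ' ' == '-' ||
            ((lines.map (fun l => l ++ List.replicate (w - l.length) ' ')).getD (lines.length - 1) []).getD c ' ' == '*' ||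
            ((lines.map (fun l => l ++ List.replicate (w - l.length) ' ')).getD (lines.length - 1) []).getD c ' ' == '/') then
          some (((lines.map (fun l => l ++ List.replicate (w - l.length) ' ')).getD (lines.length - 1) []).getD c ' ')
        else pvAOp ((lines.map (fun l => l ++ List.replicate (w - l.length) ' ')).getD (lines.length - 1) []) (e - (c + 1)) (c + 1) e)
        = pvAOp ((lines.map (fun l => l ++ List.replicate (w - l.length) ' ')).getD (lines.length - 1) []) (e - c) c e := by
      conv_rhs => rw [show e - c = (e - (c + 1)) + 1 by omega]
      simp only [pvAOp]
      rw [if_pos (by omega : c < e)]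
    rw [hnums, hop]
termination_by e - c

theorem pvAFindEnd_spec (grid : List (List Char)) (h w : Nat) (f c : Nat) (hcw : c ≤ w)
    (hf : w ≤ c + f) :
    c ≤ pvAFindEnd grid h w f c ∧ pvAFindEnd grid h w f c ≤ w ∧
    (∀ k, c ≤ k → k < pvAFindEnd grid h w f c → pvAColBlank grid h k = false) ∧
    (pvAFindEnd grid h w f c < w → pvAColBlank grid h (pvAFindEnd grid h w f c) = true) := by
  induction f generalizing c with
  | zero =>
    simp only [pvAFindEnd]
    exact ⟨le_refl _, hcw, fun k hk1 hk2 => by omega, fun hh => by omega⟩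
  | succ f ih =>
    by_cases h1 : c < w
    · by_cases h2 : pvAColBlank grid h c = true
      · have he : pvAFindEnd grid h w (f + 1) c = c := by
          simp only [pvAFindEnd]
          rw [if_pos h1, if_pos h2]
        rw [he]
        exact ⟨le_refl _, by omega, fun k hk1 hk2 => by omega, fun _ => h2⟩
      · have he : pvAFindEnd grid h w (f + 1) c = pvAFindEnd grid h w f (c + 1) := by
          simp only [pvAFindEnd]
          rw [if_pos h1, if_neg h2]
        obtain ⟨i1, i2, i3, i4⟩ := ih (c + 1) (by omega) (by omega)
        rw [he]
        refine ⟨by omega, i2, ?_, i4⟩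
        intro k hk1 hk2
        rcases Nat.eq_or_lt_of_le hk1 with rfl | hlt
        · simpa using h2
        · exact i3 k hlt hk2
    · have he : pvAFindEnd grid h w (f + 1) c = c := by
        simp only [pvAFindEnd]
        rw [if_neg h1]
      rw [he]
      exact ⟨le_refl _, hcw, fun k hk1 hk2 => by omega, fun hh => absurd hh h1⟩

-- if some in-range column's last-row char is an operator, A's scan succeeds
theorem pvAOp_isSome (lastRow : List Char) (f c e d : Nat) (hf : e ≤ c + f) (h1 : c ≤ d)
    (h2 : d < e)
    (hop : lastRow.getD d ' ' = '+' ∨ lastRow.getD d ' ' = '-' ∨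
           lastRow.getD d ' ' = '*' ∨ lastRow.getD d ' ' = '/') :
    (pvAOp lastRow f c e).isSome = true := by
  induction f generalizing c with
  | zero => omega
  | succ f ih =>
    have hce : c < e := by omega
    simp only [pvAOp]
    rw [if_pos hce]
    split
    · simp
    · rcases Nat.eq_or_lt_of_le h1 with rfl | hlt
      · rename_i hcond
        exfalso
        rcases hop with h | h | h | h <;> rw [List.getD_eq_getElem?_getD] at h <;> simp [h] at hcond
      · exact ih (c + 1) (by omega) hlt

-- the main chain: B's prefix pass plus A's suffix loop is the full B result
theorem pvChain (lines : List (List Char)) (w : Nat) (hne : lines ≠ [])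
    (hPre : ∀ st, st < w → pvPreRunOK lines w st = true) (fuel col : Nat) (hle : col ≤ w)
    (hfu : w ≤ col + fuel)
    (hb : col = w ∨ col = 0 ∨ pvBlankP lines (col - 1) ∨ pvBlankP lines col) :
    pvBGo lines.dropLast
        (((PySem.List.pyGet? lines (-1)).getD []) ++
          List.replicate (w - ((PySem.List.pyGet? lines (-1)).getD []).length) ' ')
        col ([], none)
      ++ pvALoop (lines.map (fun l => l ++ List.replicate (w - l.length) ' '))
           lines.length w (lines.length - 1) fuel col
      = pvBGo lines.dropLast
          (((PySem.List.pyGet? lines (-1)).getD []) ++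
            List.replicate (w - ((PySem.List.pyGet? lines (-1)).getD []).length) ' ')
          w ([], none) := by
  induction fuel generalizing col with
  | zero =>
    have hcw' : col = w := by omega
    subst hcw'
    simp [pvALoop]
  | succ fuel ih =>
    by_cases hcw : col < w
    · by_cases hbcol : pvBlankP lines col
      · -- blank column: both sides skip it
        have hab : pvAColBlank (lines.map (fun l => l ++ List.replicate (w - l.length) ' '))
            lines.length col = true := (pvAColBlank_iff lines w col).mpr hbcol
        have hA : pvALoop (lines.map (fun l => l ++ List.replicate (w - l.length) ' '))
            lines.length w (lines.length - 1) (fuel + 1) col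
            = pvALoop (lines.map (fun l => l ++ List.replicate (w - l.length) ' '))
                lines.length w (lines.length - 1) fuel (col + 1) := by
          simp only [pvALoop]
          rw [if_pos hcw, if_pos hab]
        rw [hA]
        have hBskip : pvBGo lines.dropLast
            (((PySem.List.pyGet? lines (-1)).getD []) ++
              List.replicate (w - ((PySem.List.pyGet? lines (-1)).getD []).length) ' ')
            (col + 1) ([], none)
            = pvBGo lines.dropLast
                (((PySem.List.pyGet? lines (-1)).getD []) ++
                  List.replicate (w - ((PySem.List.pyGet? lines (-1)).getD []).length) ' ')
                col ([], none) := by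
          simp only [pvBGo]
          rw [if_pos (by rw [pvLastP_eq lines w hne]; exact (pvBBlank_iff lines w col hne).mpr hbcol)]
        rw [← hBskip]
        exact ih (col + 1) (by omega) (by omega)
          (Or.inr (Or.inr (Or.inl (by simpa using hbcol))))
      · -- non-blank column: a whole block
        have hbound : col = 0 ∨ pvBlankP lines (col - 1) := by
          rcases hb with h | h | h | h
          · omega
          · exact Or.inl h
          · exact Or.inr h
          · exact absurd h hbcol
        have hab : pvAColBlank (lines.map (fun l => l ++ List.replicate (w - l.length) ' '))
            lines.length col = false := by
          rcases Bool.eq_false_or_eq_true (pvAColBlank (lines.map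
            (fun l => l ++ List.replicate (w - l.length) ' ')) lines.length col) with h | h
          · exact absurd ((pvAColBlank_iff lines w col).mp h) hbcol
          · exact h
        obtain ⟨i1, i2, i3, i4⟩ := pvAFindEnd_spec (lines.map (fun l => l ++ List.replicate (w - l.length) ' '))
          lines.length w (w - col) col (le_of_lt hcw) (by omega)
        obtain ⟨e, hedef⟩ : ∃ e, pvAFindEnd (lines.map (fun l => l ++ List.replicate (w - l.length) ' '))
            lines.length w (w - col) col = e := ⟨_, rfl⟩
        rw [hedef] at i1 i2 i3 i4
        have hcole : col < e := by
          rcases Nat.eq_or_lt_of_le i1 with heq | h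
          · exfalso
            have := i4 (by omega)
            rw [← heq] at this
            rw [this] at hab
            simp at hab
          · exact h
        obtain ⟨d, hdw, hdge, hdnb, hdop⟩ := pvPreRunOK_spec lines w col (hPre col hcw) hbcol hbound
        have hde : d < e := by
          by_contra hcon
          have hew : e < w := by omega
          have hbe : pvBlankP lines e := (pvAColBlank_iff lines w e).mp (i4 hew)
          exact (hdnb e (by omega) i1) hbe
        have hopd : ((lines.map (fun l => l ++ List.replicate (w - l.length) ' ')).getD
            (lines.length - 1) []).getD d ' ' = '+' ∨
            ((lines.map (fun l => l ++ List.replicate (w - l.length) ' ')).getD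
            (lines.length - 1) []).getD d ' ' = '-' ∨
            ((lines.map (fun l => l ++ List.replicate (w - l.length) ' ')).getD
            (lines.length - 1) []).getD d ' ' = '*' ∨
            ((lines.map (fun l => l ++ List.replicate (w - l.length) ' ')).getD
            (lines.length - 1) []).getD d ' ' = '/' := by
          rw [pvGridCell]
          exact hdop
        have hsome := pvAOp_isSome ((lines.map (fun l => l ++ List.replicate (w - l.length) ' ')).getD
            (lines.length - 1) []) (e - col) col e d (by omega) hdge hde hopd
        obtain ⟨op, hop⟩ := Option.isSome_iff_exists.mp hsome
        have hnbs : ∀ j, col ≤ j → j < e → ¬ pvBlankP lines j := by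
          intro j hj1 hj2 hbj
          have := i3 j hj1 hj2
          rw [(pvAColBlank_iff lines w j).mpr hbj] at this
          simp at this
        -- B's pass up to e splits into the pass up to col plus this block's problem
        have hB : pvBGo lines.dropLast
            (((PySem.List.pyGet? lines (-1)).getD []) ++
              List.replicate (w - ((PySem.List.pyGet? lines (-1)).getD []).length) ' ')
            e ([], none)
            = pvBGo lines.dropLast
                (((PySem.List.pyGet? lines (-1)).getD []) ++
                  List.replicate (w - ((PySem.List.pyGet? lines (-1)).getD []).length) ' ')
                col ([], none)
              ++ [(pvANums (lines.map (fun l => l ++ List.replicate (w - l.length) ' ')) (lines.length - 1) col (e - col),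
                   String.ofList [op])] := by
          rw [pvBAccum lines w hne e col hcole hnbs [],
              pvBClose lines w hne col hbound _ [], hop]
          rw [show pvBFlushOut
                (pvANums (lines.map (fun l => l ++ List.replicate (w - l.length) ' ')) (lines.length - 1) col (e - col),
                 some op, e - 1)
              = [(pvANums (lines.map (fun l => l ++ List.replicate (w - l.length) ' ')) (lines.length - 1) col (e - col),
                   String.ofList [op])] from rfl]
          rw [List.append_nil]
          exact pvBGo_probs _ _ col none _
        have hrec := ih e i2 (by omega)
          (by
            rcases Nat.eq_or_lt_of_le i2 with rfl | hew
            · exact Or.inl rfl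
            · exact Or.inr (Or.inr (Or.inr ((pvAColBlank_iff lines w e).mp (i4 hew)))))
        have hA : pvALoop (lines.map (fun l => l ++ List.replicate (w - l.length) ' '))
            lines.length w (lines.length - 1) (fuel + 1) col
            = (pvANums (lines.map (fun l => l ++ List.replicate (w - l.length) ' ')) (lines.length - 1) col (e - col),
               String.ofList [op])
              :: pvALoop (lines.map (fun l => l ++ List.replicate (w - l.length) ' '))
                   lines.length w (lines.length - 1) fuel e := by
          simp only [pvALoop]
          rw [if_pos hcw, if_neg (by simp [hab])]
          rw [hedef, hop]
        rw [hA, ← hrec, hB]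
        simp
    · have hcw' : col = w := by omega
      have hA : pvALoop (lines.map (fun l => l ++ List.replicate (w - l.length) ' '))
          lines.length w (lines.length - 1) (fuel + 1) col = [] := by
        simp only [pvALoop]
        rw [if_neg hcw]
      rw [hA, hcw']
      simp

-- ===== VERDICT (by name: the statement is the Claim_ definition above) =====
theorem parse_worksheet_part2_spec : Claim_equal_parse_worksheet_part2 := by
  intro s _hdom hpre
  unfold Spec_parse_worksheet_part2 parse_worksheet_part2 parse_worksheet_part2_alt
  dsimp only
  have hmap : ((PySem.Chars.splitlines s.toList).filter
      (fun l => !(PySem.Chars.strip l).isEmpty)).map pvRstripNL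
      = (PySem.Chars.splitlines s.toList).filter (fun l => !(PySem.Chars.strip l).isEmpty) := by
    refine (List.map_congr_left fun l hl => ?_).trans (List.map_id _)
    exact pvRstripNL_id l (pvSplitlinesNoNL s.toList l (List.mem_of_mem_filter hl))
  rw [hmap]
  by_cases hemp : ((PySem.Chars.splitlines s.toList).filter
      (fun l => !(PySem.Chars.strip l).isEmpty)).isEmpty
  · rw [if_pos hemp, if_pos hemp]
  · rw [if_neg hemp, if_neg hemp]
    have hne : (PySem.Chars.splitlines s.toList).filter
        (fun l => !(PySem.Chars.strip l).isEmpty) ≠ [] := by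
      simpa [List.isEmpty_iff] using hemp
    simp only [List.length_map]
    have := pvChain _ (((((PySem.Chars.splitlines s.toList).filter
        (fun l => !(PySem.Chars.strip l).isEmpty)).map List.length).foldl max 0)) hne
      (fun st hst => List.all_eq_true.mp hpre st (List.mem_range.mpr hst))
      (((((PySem.Chars.splitlines s.toList).filter
        (fun l => !(PySem.Chars.strip l).isEmpty)).map List.length).foldl max 0)) 0 (by omega) (by omega)
      (Or.inr (Or.inl rfl))
    rw [show pvBGo _ _ 0 ([], none) = [] from rfl, List.nil_append] at this
    exact this
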